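-- pv_equiv track=rewrite | github.com/rocketfuel/mool | build_tool/bu.scripts/mool/cc_common.py | sort_gcc_link_libs
-- ===== SOURCE A (Python) =====
-- def sort_gcc_link_libs(link_libs):
--   """gcc's dumb linker needs the link libraries in proper order for the
--   compilation to work. General rule of thumb if a depends on b then a comes
--   before b on command line."""
--   # .o files first, then .a files and then remaining files. We may want to get
--   # rid of .a files as its difficult to find dependency order b/w them.
--   object_files = [lib for lib in link_libs if lib.endswith('.o')]
--   archives = [lib for lib in link_libs if lib.endswith('.a')]
--   other_libs = [lib for lib in link_libs
--                 if not lib in object_files and not lib in archives]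
--   arranged_libs = list(object_files)
--   arranged_libs.extend(archives)
--   arranged_libs.extend(other_libs)
--   return arranged_libs
-- ===== SOURCE B (Python) =====
-- def sort_gcc_link_libs(link_libs):
--   """Same result via one stable sort on a 3-way priority key:
--   .o files first, then .a files, then the rest (stable => intra-group
--   order preserved, exactly as the three filter passes produce)."""
--   def priority(lib):
--     if lib.endswith('.o'):
--       return 0
--     if lib.endswith('.a'):
--       return 1
--     return 2
--   return sorted(link_libs, key=priority)
-- ===== Notes on version B (the rewrite author's own statement) =====
-- stated objective: idiomatic
-- what changed: Replaces the three filter passes (plus quadratic membership tests for the 'other' pass) and concatenation with a single stable sort on a 3-valued priority key (0 for '.o', 1 for '.a', 2 otherwise).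
import Mathlib
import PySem

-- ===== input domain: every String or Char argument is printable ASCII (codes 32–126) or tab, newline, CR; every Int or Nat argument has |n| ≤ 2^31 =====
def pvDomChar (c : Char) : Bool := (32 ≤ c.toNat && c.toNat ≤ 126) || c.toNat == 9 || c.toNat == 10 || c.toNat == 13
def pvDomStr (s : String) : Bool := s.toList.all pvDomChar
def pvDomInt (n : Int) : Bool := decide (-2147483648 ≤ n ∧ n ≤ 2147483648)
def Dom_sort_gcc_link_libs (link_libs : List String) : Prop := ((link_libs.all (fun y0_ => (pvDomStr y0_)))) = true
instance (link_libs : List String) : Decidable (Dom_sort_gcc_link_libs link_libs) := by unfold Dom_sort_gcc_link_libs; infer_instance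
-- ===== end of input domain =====

-- B replaces A's three filter passes and concatenation with a single stable sort
-- on a 3-valued priority key (idiomatic; return value only, no mutation either way).

-- ===== PORT A =====
def sort_gcc_link_libs (link_libs : List String) : List String :=
  let object_files := link_libs.filter (fun lib => PySem.Str.endswith lib ".o")
  let archives := link_libs.filter (fun lib => PySem.Str.endswith lib ".a")
  let other_libs := link_libs.filter
    (fun lib => !(object_files.contains lib) && !(archives.contains lib))
  object_files ++ archives ++ other_libs

-- ===== PORT B =====
def pvPriority (lib : String) : Int :=
  if PySem.Str.endswith lib ".o" then 0
  else if PySem.Str.endswith lib ".a" then 1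
  else 2

def sort_gcc_link_libs_alt (link_libs : List String) : List String :=
  PySem.List.sorted link_libs pvPriority false

-- ===== PRECONDITION & SPEC =====
def Spec_sort_gcc_link_libs (link_libs : List String) (out : List String) : Prop := out = sort_gcc_link_libs_alt link_libs
instance (link_libs : List String) (out : List String) : Decidable (Spec_sort_gcc_link_libs link_libs out) := by unfold Spec_sort_gcc_link_libs; infer_instance

-- ===== CLAIM (what is proved, stated in full; the proofs are below) =====
def Claim_equal_sort_gcc_link_libs : Prop := ∀ (link_libs : List String), Dom_sort_gcc_link_libs link_libs → Spec_sort_gcc_link_libs link_libs (sort_gcc_link_libs link_libs)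

-- ===== LEMMAS AND PROOFS =====

-- a string cannot end with both ".o" and ".a"
lemma not_endswith_o_and_a (s : String) (ho : PySem.Str.endswith s ".o" = true) :
    PySem.Str.endswith s ".a" = false := by
  by_contra h
  have ha : PySem.Str.endswith s ".a" = true := by
    cases hb : PySem.Str.endswith s ".a" with
    | false => exact absurd hb h
    | true => rfl
  rw [PySem.Str.endswith_eq] at ho ha
  rw [PySem.Chars.endswith_iff] at ho ha
  rcases List.suffix_or_suffix_of_suffix ho ha with hs | hs <;> exact absurd hs (by decide)

lemma priority_cases (s : String) :
    pvPriority s = 0 ∨ pvPriority s = 1 ∨ pvPriority s = 2 := by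
  unfold pvPriority; split_ifs <;> simp

-- inserting into l1 ++ l2 when x goes exactly between them
lemma insertBy_append_mid {α : Type} (before : α → α → Bool) (x : α) (l1 l2 : List α)
    (h1 : ∀ y ∈ l1, before x y = false) (h2 : ∀ y ∈ l2, before x y = true) :
    PySem.List.insertBy before x (l1 ++ l2) = l1 ++ x :: l2 := by
  induction l1 with
  | nil =>
    cases l2 with
    | nil => simp [PySem.List.insertBy]
    | cons y ys => simp [PySem.List.insertBy, h2 y (by simp)]
  | cons y ys ih =>
    have hy : before x y = false := h1 y (by simp)
    simp only [List.cons_append, PySem.List.insertBy, hy]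
    simp only [Bool.false_eq_true, if_false]
    rw [ih (fun z hz => h1 z (by simp [hz]))]

-- invariant of the insertion-sort fold: the accumulator stays a concatenation of
-- the three priority groups, each extended in input order
lemma foldl_insert_inv (xs : List String) : ∀ (a0 a1 a2 : List String),
    (∀ y ∈ a0, pvPriority y = 0) → (∀ y ∈ a1, pvPriority y = 1) → (∀ y ∈ a2, pvPriority y = 2) →
    xs.foldl (fun acc x => PySem.List.insertBy (fun a b => decide (pvPriority a < pvPriority b)) x acc)
      (a0 ++ a1 ++ a2) =
    (a0 ++ xs.filter (fun l => pvPriority l == 0)) ++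
    (a1 ++ xs.filter (fun l => pvPriority l == 1)) ++
    (a2 ++ xs.filter (fun l => pvPriority l == 2)) := by
  induction xs with
  | nil => intro a0 a1 a2 _ _ _; simp
  | cons x xs ih =>
    intro a0 a1 a2 h0 h1 h2
    rcases priority_cases x with hx | hx | hx
    · have hins : PySem.List.insertBy (fun a b => decide (pvPriority a < pvPriority b)) x
          (a0 ++ a1 ++ a2) = (a0 ++ [x]) ++ a1 ++ a2 := by
        rw [List.append_assoc, insertBy_append_mid _ _ a0 (a1 ++ a2)
          (fun y hy => by simp [hx, h0 y hy])
          (fun y hy => by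
            rcases List.mem_append.1 hy with h | h
            · simp [hx, h1 y h]
            · simp [hx, h2 y h])]
        simp
      simp only [List.foldl_cons, hins]
      rw [ih (a0 ++ [x]) a1 a2
        (fun y hy => by rcases List.mem_append.1 hy with h | h
                        · exact h0 y h
                        · simp at h; simp [h, hx]) h1 h2]
      simp [hx]
    · have hins : PySem.List.insertBy (fun a b => decide (pvPriority a < pvPriority b)) x
          (a0 ++ a1 ++ a2) = a0 ++ (a1 ++ [x]) ++ a2 := by
        rw [insertBy_append_mid _ _ (a0 ++ a1) a2
          (fun y hy => by
            rcases List.mem_append.1 hy with h | h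
            · simp [hx, h0 y h]
            · simp [hx, h1 y h])
          (fun y hy => by simp [hx, h2 y hy])]
        simp
      simp only [List.foldl_cons, hins]
      rw [ih a0 (a1 ++ [x]) a2 h0
        (fun y hy => by rcases List.mem_append.1 hy with h | h
                        · exact h1 y h
                        · simp at h; simp [h, hx]) h2]
      simp [hx]
    · have hins : PySem.List.insertBy (fun a b => decide (pvPriority a < pvPriority b)) x
          (a0 ++ a1 ++ a2) = a0 ++ a1 ++ (a2 ++ [x]) := by
        rw [PySem.List.insertBy_of_forall_not_before _ _ _
          (fun y hy => by
            rcases List.mem_append.1 hy with h | h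
            · rcases List.mem_append.1 h with h' | h'
              · simp [hx, h0 y h']
              · simp [hx, h1 y h']
            · simp [hx, h2 y h])]
        simp
      simp only [List.foldl_cons, hins]
      rw [ih a0 a1 (a2 ++ [x]) h0 h1
        (fun y hy => by rcases List.mem_append.1 hy with h | h
                        · exact h2 y h
                        · simp at h; simp [h, hx])]
      simp [hx]

-- the stable sort is exactly the three priority groups concatenated
lemma sorted_eq_groups (xs : List String) :
    PySem.List.sorted xs pvPriority false =
    xs.filter (fun l => pvPriority l == 0) ++
    xs.filter (fun l => pvPriority l == 1) ++
    xs.filter (fun l => pvPriority l == 2) := by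
  rw [PySem.List.sorted_eq_foldl_insertBy]
  have := foldl_insert_inv xs [] [] [] (by simp) (by simp) (by simp)
  simpa using this

-- the three key-groups are A's three filters
lemma filter_prio0 (xs : List String) :
    xs.filter (fun l => pvPriority l == 0) = xs.filter (fun lib => PySem.Str.endswith lib ".o") := by
  apply List.filter_congr
  intro l _
  unfold pvPriority
  cases h1 : PySem.Str.endswith l ".o" <;> cases h2 : PySem.Str.endswith l ".a" <;> decide

lemma filter_prio1 (xs : List String) :
    xs.filter (fun l => pvPriority l == 1) = xs.filter (fun lib => PySem.Str.endswith lib ".a") := by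
  apply List.filter_congr
  intro l _
  unfold pvPriority
  cases h1 : PySem.Str.endswith l ".o" <;> cases h2 : PySem.Str.endswith l ".a" <;>
    first
      | decide
      | exact absurd ((not_endswith_o_and_a l h1).symm.trans h2) (by decide)

lemma filter_prio2 (xs : List String) :
    xs.filter (fun l => pvPriority l == 2) =
    xs.filter (fun lib => !(PySem.Str.endswith lib ".o") && !(PySem.Str.endswith lib ".a")) := by
  apply List.filter_congr
  intro l _
  unfold pvPriority
  cases h1 : PySem.Str.endswith l ".o" <;> cases h2 : PySem.Str.endswith l ".a" <;> decide

-- A's 'other' pass (membership in the first two filtered lists) is the direct suffix test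
lemma other_filter_eq (xs : List String) :
    xs.filter (fun lib => !((xs.filter (fun l => PySem.Str.endswith l ".o")).contains lib)
                       && !((xs.filter (fun l => PySem.Str.endswith l ".a")).contains lib)) =
    xs.filter (fun lib => !(PySem.Str.endswith lib ".o") && !(PySem.Str.endswith lib ".a")) := by
  apply List.filter_congr
  intro l hl
  simp [hl]

-- ===== VERDICT (by name: the statement is the Claim_ definition above) =====
theorem sort_gcc_link_libs_spec : Claim_equal_sort_gcc_link_libs := by
  intro link_libs _
  show sort_gcc_link_libs link_libs = sort_gcc_link_libs_alt link_libs
  simp only [sort_gcc_link_libs, sort_gcc_link_libs_alt]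
  rw [sorted_eq_groups, filter_prio0, filter_prio1, filter_prio2, other_filter_eq]
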